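-- pv_equiv track=rewrite | github.com/xiaohan2012/capitalization-restoration-train | baseline3.py | appear_only_at_sentence_beginning
-- ===== SOURCE A (Python) =====
-- def appear_only_at_sentence_beginning(word, title, sents):
--     """
--     if the token appears in the text only at the beginning of the sentences
--
--     >>> title = [u"Feng", u"Chao", u"Liang", u"Blah"]
--     >>> doc = [[u"Feng", u"Chao", u"Liang", u"is", u"in", u"Wuhan", u"."], [u"Chao", u"Liang", u"is", u"not", u"."], [u"Liang", u"Chao", u"is", u"not", u"."]]
--     >>> appear_only_at_sentence_beginning(u"Feng", title, doc)
--     True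
--     >>> appear_only_at_sentence_beginning(u"Chao", title, doc)
--     False
--     >>> appear_only_at_sentence_beginning(u"Blah", title, doc)
--     False
--     """
--     assert (word in title), "The word should be a title word"
--     appear_at_sentence_beginning = False
--
--     for sent in sents:
--         sent_start = True
--         for w in sent:
--             if sent_start and w == word and word[0].isupper():
--                 appear_at_sentence_beginning = True
--             elif w == word: # appeared cap in the middle of sentence
--                 return False
--             sent_start = False
--
--     if appear_at_sentence_beginning:
--         return True
--     else:
--         return False
-- ===== SOURCE B (Python) =====
-- def appear_only_at_sentence_beginning(word, title, sents):
--     assert (word in title), "The word should be a title word"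
--     heads = [sent[0] for sent in sents if sent]
--     tails = [w for sent in sents for w in sent[1:]]
--     return word in heads and word not in tails and word[0].isupper()
-- ===== Notes on version B (the rewrite author's own statement) =====
-- stated objective: alternative
-- what changed: Replaces A's stateful single pass (sent_start flag, found accumulator, early returns) by two staged comprehension passes that materialize the sentence heads and the flattened tails, then a single boolean membership formula.
import Mathlib
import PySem

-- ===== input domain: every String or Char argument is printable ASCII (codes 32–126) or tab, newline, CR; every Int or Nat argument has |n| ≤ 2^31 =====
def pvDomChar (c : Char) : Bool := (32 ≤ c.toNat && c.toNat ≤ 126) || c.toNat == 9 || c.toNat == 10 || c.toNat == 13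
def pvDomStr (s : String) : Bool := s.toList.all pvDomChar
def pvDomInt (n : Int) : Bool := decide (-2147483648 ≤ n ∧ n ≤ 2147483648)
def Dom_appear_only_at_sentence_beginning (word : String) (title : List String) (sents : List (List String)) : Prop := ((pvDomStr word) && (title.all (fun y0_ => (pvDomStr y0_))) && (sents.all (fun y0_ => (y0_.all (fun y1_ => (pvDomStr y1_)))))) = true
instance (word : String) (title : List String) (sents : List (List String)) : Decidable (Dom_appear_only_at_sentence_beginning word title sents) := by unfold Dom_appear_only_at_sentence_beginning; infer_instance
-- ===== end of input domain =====

-- B replaces A's stateful single pass (sent_start flag, found accumulator, early returns) by two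
-- staged comprehension passes (heads, flattened tails) and one boolean membership formula.

-- ===== PORT A =====
-- word[0].isupper(); none = empty word, where Python raises IndexError (outside Pre_)
def aUpper0 (word : String) : Bool :=
  match PySem.Str.pyGet? word 0 with
  | some c => PySem.Chars.isupper c
  | none => false

-- the inner 'for w in sent' loop; .error b = 'return b' escaping the whole function
def aWords (word : String) : List String → Bool → Bool → Except Bool Bool
  | [], _, found => .ok found
  | w :: ws, sentStart, found =>
    if sentStart && w == word && aUpper0 word then aWords word ws false true
    else if w == word then .error false
    else aWords word ws false found

-- the outer 'for sent in sents' loop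
def aSents (word : String) : List (List String) → Bool → Except Bool Bool
  | [], found => .ok found
  | sent :: rest, found =>
    match aWords word sent true found with
    | .error b => .error b
    | .ok found' => aSents word rest found'

def appear_only_at_sentence_beginning (word : String) (title : List String) (sents : List (List String)) : Bool :=
  match aSents word sents false with
  | .error b => b
  | .ok found => if found then true else false

-- ===== PORT B =====
-- word[0].isupper(); none = empty word (IndexError in Python; reached only outside Pre_)
def bUpper0 (word : String) : Bool :=
  match PySem.Str.pyGet? word 0 with
  | some c => PySem.Chars.isupper c
  | none => false

-- [sent[0] for sent in sents if sent]
def bHeads (sents : List (List String)) : List String := sents.filterMap List.head?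

-- [w for sent in sents for w in sent[1:]]
def bTails (sents : List (List String)) : List String :=
  sents.flatMap (fun sent => PySem.List.slice sent (some 1) none)

def appear_only_at_sentence_beginning_alt (word : String) (title : List String) (sents : List (List String)) : Bool :=
  (bHeads sents).contains word && (!(bTails sents).contains word && bUpper0 word)

-- ===== PRECONDITION & SPEC =====
-- Pre_ excludes exactly the inputs where Python A raises: the assertion (word not in title), and the
-- empty word hitting a sentence head (IndexError on word[0]) before any earlier occurrence of "" has
-- caused a return.
def Pre_appear_only_at_sentence_beginning (word : String) (title : List String) (sents : List (List String)) : Prop :=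
  word ∈ title ∧
  ¬ (word = "" ∧ ∃ i < sents.length, (sents.getD i []).head? = some "" ∧ ∀ j < i, "" ∉ sents.getD j [])

instance (word : String) (title : List String) (sents : List (List String)) : Decidable (Pre_appear_only_at_sentence_beginning word title sents) := by
  unfold Pre_appear_only_at_sentence_beginning; infer_instance

def pvWitness_appear_only_at_sentence_beginning : String × List String × List (List String) :=
  ("Feng", ["Feng", "Blah"], [["Feng", "is", "here"], ["He", "is"]])

def Spec_appear_only_at_sentence_beginning (word : String) (title : List String) (sents : List (List String)) (out : Bool) : Prop := out = appear_only_at_sentence_beginning_alt word title sents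
instance (word : String) (title : List String) (sents : List (List String)) (out : Bool) : Decidable (Spec_appear_only_at_sentence_beginning word title sents out) := by unfold Spec_appear_only_at_sentence_beginning; infer_instance

-- ===== CLAIM (what is proved, stated in full; the proofs are below) =====
def Claim_equal_appear_only_at_sentence_beginning : Prop := ∀ (word : String) (title : List String) (sents : List (List String)), Dom_appear_only_at_sentence_beginning word title sents → Pre_appear_only_at_sentence_beginning word title sents → Spec_appear_only_at_sentence_beginning word title sents (appear_only_at_sentence_beginning word title sents)

-- ===== LEMMAS AND PROOFS =====

-- after the first word sent_start is False, so the rest of the inner loop is a membership test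
lemma aWords_tail (word : String) (ws : List String) (found : Bool) :
    aWords word ws false found = if word ∈ ws then .error false else .ok found := by
  induction ws generalizing found with
  | nil => simp [aWords]
  | cons w ws ih =>
    simp only [aWords, Bool.false_and]
    by_cases h : w = word
    · simp [h]
    · have h2 : ¬ word = w := fun e => h e.symm
      simp [h, h2, ih]

-- one full sentence of A's inner loop, in head/tail shape
lemma aWords_sent (word : String) (sent : List String) (found : Bool) :
    aWords word sent true found =
      if sent.head? == some word then
        if !(aUpper0 word) then .error false
        else if word ∈ sent.tail then .error false
        else .ok true
      else if word ∈ sent.tail then .error false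
      else .ok found := by
  cases sent with
  | nil => simp [aWords]
  | cons w ws =>
    simp only [aWords, List.head?_cons, List.tail_cons, Bool.true_and]
    by_cases h : w = word
    · by_cases hu : aUpper0 word
      · simp [h, hu, aWords_tail]
      · simp [h, hu]
    · simp [h, aWords_tail]

-- the value A's outer loop produces, characterized by B's two staged lists;
-- the invariant 'found -> word is capitalized' holds because found is only set in the upper branch
lemma aSents_val (word : String) (sents : List (List String)) (found : Bool)
    (h : found = true → aUpper0 word = true) :
    (match aSents word sents found with | .error b => b | .ok f => f) =
      (!(bTails sents).contains word &&
        (found || (aUpper0 word && (bHeads sents).contains word))) := by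
  induction sents generalizing found with
  | nil => cases found <;> simp_all [aSents, bTails, bHeads]
  | cons sent rest ih =>
    have hT : ∀ x : String, x ∈ bTails (sent :: rest) ↔ (x ∈ sent.tail ∨ x ∈ bTails rest) := by
      intro x; simp [bTails, PySem.List.slice_from_one]
    cases hhd : sent.head? with
    | none =>
      have hse : sent = [] := List.head?_eq_none_iff.mp hhd
      subst hse
      simp [aSents, aWords_sent, bTails, bHeads, PySem.List.slice_from_one, ih found h]
    | some w =>
      have hH : ∀ x : String, x ∈ bHeads (sent :: rest) ↔ (x = w ∨ x ∈ bHeads rest) := by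
        intro x; simp [bHeads, hhd]
      by_cases hwd : w = word
      · subst hwd
        have hbe : (sent.head? == some w) = true := by simp [hhd]
        simp only [aSents, aWords_sent, hbe, if_pos]
        by_cases hu : aUpper0 w
        · by_cases htl : w ∈ sent.tail
          · simp [hu, htl, hT, hH, List.contains_eq_mem]
          · have hrec := ih true (fun _ => hu)
            simp [hu, htl, hrec, hT, hH, List.contains_eq_mem]
        · cases found with
          | true => exact absurd (h rfl) (by simpa using hu)
          | false => simp [hu, hT, hH, List.contains_eq_mem]
      · have hwn : ¬ word = w := fun e => hwd e.symm
        have hne : ¬ (sent.head? == some word) = true := by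
          simp [hhd]; intro e; exact hwd e
        simp only [aSents, aWords_sent, if_neg hne]
        by_cases htl : word ∈ sent.tail
        · simp [htl, hT, List.contains_eq_mem]
        · simp [htl, ih found h, hT, hH, hwn, List.contains_eq_mem]

-- ===== VERDICT (by name: the statement is the Claim_ definition above) =====
theorem appear_only_at_sentence_beginning_spec : Claim_equal_appear_only_at_sentence_beginning := by
  intro word title sents _ _
  unfold Spec_appear_only_at_sentence_beginning
  unfold appear_only_at_sentence_beginning appear_only_at_sentence_beginning_alt
  have h := aSents_val word sents false (by simp)
  have h2 : (match aSents word sents false with | .error b => b | .ok f => if f then true else false)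
      = (match aSents word sents false with | .error b => b | .ok f => f) := by
    cases aSents word sents false with
    | error b => rfl
    | ok f => cases f <;> rfl
  rw [h2, h]
  have hub : bUpper0 word = aUpper0 word := rfl
  rw [hub]
  cases (bHeads sents).contains word <;> cases (bTails sents).contains word <;>
    cases aUpper0 word <;> rfl
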